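/- GENERATED by mk_final_copies.py from the proof of the farm's unit `start_decoder.ERR` (farm:start_decoder.ERR.1: Proof.lean) as the
   re-elaboration sweep compiled it — do not edit. -/
import Asan.CheckWalk
import Vorbis.Spec.Units.start_decoder_ERR
import Vorbis.Spec.Worked.start_decoder_ERR_Lemmas

open X86 X86.User Asan Vorbis Vorbis.Spec Vorbis.Spec.StartDecoder

set_option maxRecDepth 4000
set_option maxHeartbeats 4000000

namespace Vorbis.Spec.start_decoder_ERR

/-- **Segment `start_decoder.ERR`** (0x113b22 – 0x113b79, stb_vorbis_fixed.c:3608 / 4233: the single epilogue): `mov rcx, [rsp+8]`,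
six stores of 0 into the shadow of the own protected frame, `add rsp, 598H`, six pops, `ret`. From `AtERR` (the frame `FR`, eax = the
result, SD.ERR or SD.12 over the live set WITH the own frame) to the function's `Returned`: the post over the live set WITHOUT it. -/
theorem seg_err (Lay : Layout) (hLay : Lay.hi = 0x1000000) (μ : Microarch) (hμ : UserX.MicroOK μ) (u₀ : State)
    (hcode : HasCodeNat Lay u₀ Vorbis.L.start_decoder.entry Vorbis.Code.code_start_decoder.nat Vorbis.L.start_decoder.size) :
    Vorbis.Spec.StartDecoder.SegERR Lay μ u₀ := by
  intro g v hat
  obtain ⟨A, hb⟩ := hat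
  have fr := hb.frame
  -- 1. the ENTRY state's facts (about `g.e`)
  have he := fr.entry
  v_entry he
  simp only [StartDecoder.depth] at he_room he_stack
  -- 2. the PRESENT state's facts: rip, rsp = RA − 1480 as a word, the code span, DF / MXCSR / SseOK
  have w_rip := fr.rip
  have hrsp : v.reg .rsp = g.e.reg .rsp - 1480 := by
    rw [fr.rsp]
    have e0 := addr_R g he_room 0 1480 1480 rfl rfl
    rw [Nat.add_zero] at e0
    exact e0
  have w_eq : Mem.EqOn Vorbis.L.textLo Vorbis.L.textHi u₀.mem v.mem := fr.code
  have hdf : v.flags .df = false := (show abiInv _ from fr.inv).1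
  have hmx : v.mxcsr &&& 0x1F80 = 0x1F80 := (show abiInv _ from fr.inv).2
  have hsse := Vorbis.sseOK_of_abiInv fr.inv
  -- 3. the slots the segment loads: the shadow index `[R + 8]`, the six saved registers, the return address
  have sidx : v.mem.readLE (g.e.reg .rsp - 1472) 8 = ((g.e.reg .rsp).toNat - 1400) / 8 := by
    have h8 := fr.shadowIdx
    unfold Mem.u64 at h8
    rw [addr_R g he_room 8 1472 1472 rfl rfl] at h8
    rw [h8]
    unfold Ghost.R Ghost.RA steady
    omega
  have hs_rbx : UInt64.ofNat (v.mem.readLE (g.e.reg .rsp - 48) 8) = g.e.reg .rbx := by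
    have h8 := fr.saved_rbx
    unfold Mem.u64 at h8
    rw [addr_R g he_room 0x598 48 48 rfl rfl] at h8
    rw [h8]
    exact UInt64.ofNat_toNat
  have hs_rbp : UInt64.ofNat (v.mem.readLE (g.e.reg .rsp - 40) 8) = g.e.reg .rbp := by
    have h8 := fr.saved_rbp
    unfold Mem.u64 at h8
    rw [addr_R g he_room 0x5a0 40 40 rfl rfl] at h8
    rw [h8]
    exact UInt64.ofNat_toNat
  have hs_r12 : UInt64.ofNat (v.mem.readLE (g.e.reg .rsp - 32) 8) = g.e.reg .r12 := by
    have h8 := fr.saved_r12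
    unfold Mem.u64 at h8
    rw [addr_R g he_room 0x5a8 32 32 rfl rfl] at h8
    rw [h8]
    exact UInt64.ofNat_toNat
  have hs_r13 : UInt64.ofNat (v.mem.readLE (g.e.reg .rsp - 24) 8) = g.e.reg .r13 := by
    have h8 := fr.saved_r13
    unfold Mem.u64 at h8
    rw [addr_R g he_room 0x5b0 24 24 rfl rfl] at h8
    rw [h8]
    exact UInt64.ofNat_toNat
  have hs_r14 : UInt64.ofNat (v.mem.readLE (g.e.reg .rsp - 16) 8) = g.e.reg .r14 := by
    have h8 := fr.saved_r14
    unfold Mem.u64 at h8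
    rw [addr_R g he_room 0x5b8 16 16 rfl rfl] at h8
    rw [h8]
    exact UInt64.ofNat_toNat
  have hs_r15 : UInt64.ofNat (v.mem.readLE (g.e.reg .rsp - 8) 8) = g.e.reg .r15 := by
    have h8 := fr.saved_r15
    unfold Mem.u64 at h8
    rw [addr_R g he_room 0x5c0 8 8 rfl rfl] at h8
    rw [h8]
    exact UInt64.ofNat_toNat
  have hs_ra : UInt64.ofNat (v.mem.readLE (g.e.reg .rsp) 8) = g.ret := by
    have h8 := fr.saved_ra
    unfold Mem.u64 at h8
    rw [addr_R g he_room 0x5c8 0 0 rfl rfl, UInt64.sub_zero] at h8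
    rw [h8]
    exact UInt64.ofNat_toNat
  -- the shadow index in rcx is a granule number: with it the walker places the six stores in the shadow region and reads the
  -- seven stack slots through them
  have hq : (UInt64.ofNat (((g.e.reg .rsp).toNat - 1400) / 8)).toNat < 0x200000 := by
    rw [UInt64.toNat_ofNat']
    omega
  -- 4. the walk: 0x113b22 … the `ret` at 0x113b79
  u_walk hcode [hμ.vendor] span [Vorbis.L.textLo, Vorbis.L.textHi] side (v_side)
  -- 5. the exit: `Returned … g.e g.ret`
  refine ReachVia.done ?_
  -- the memory after the six stores is `storesMem … epilogue`
  rw [epi_stores] at w_mem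
  have hpos := base_eq fr
  have hinv' := shadow_after fr
  have hsame' := footprint_after fr
  have hone := same_after v.mem g.RA hpos.2.2.2
  unfold Ghost.RA at hinv' hsame' hone hpos
  rw [← w_mem] at hinv' hsame' hone
  v_returned
  · -- the post
    refine ⟨A, fr.ext, ?_, fr.offText, hb.hand, ?_⟩
    · -- SH1 – SH8 with the own frame popped, the stack clean below the stack pointer after the `ret`
      have ersp : (s_113b79.reg .rsp).toNat = (g.e.reg .rsp).toNat + 8 := by
        rw [w_rsp]
        u_omega
      rw [ersp]
      exact hinv'
    · -- SD.12 / SD.ERR over the live set without the own frame; eax untouched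
      have erax : s_113b79.reg .rax = v.reg .rax := w_kept .rax rfl
      rw [erax]
      rcases hb.result with ⟨h0, hfail⟩ | ⟨h1, hdone⟩
      · exact Or.inr ⟨h0, failed_after hfail hb.hand fr.shadow hinv' (by omega) hone⟩
      · exact Or.inl ⟨h1, done_after hdone hb.hand fr.shadow hinv' (by omega) hone⟩
  · -- the callee-saved registers: six popped back
    intro r hr
    cases r <;> first
      | (exact absurd hr (by decide))
      | (with_reducible assumption)
  · -- the footprint
    simp only [X86.User.Spec.footprint, vspec]
    exact hsame'

end Vorbis.Spec.start_decoder_ERR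

theorem Vorbis.Spec.Worked.start_decoder_ERR_ok : Vorbis.Spec.start_decoder_ERR.Statement := by
  unfold Vorbis.Spec.start_decoder_ERR.Statement
  intro Lay hLay μ hμ u₀ hcode
  exact Vorbis.Spec.start_decoder_ERR.seg_err Lay hLay μ hμ u₀ hcode
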